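-- pv_equiv track=rewrite | github.com/rafaellevy/GrokkingTheCode | twoPointers.py | minimumWindowSort
-- ===== SOURCE A (Python) =====
-- def minimumWindowSort(arr):
--     sortedArr = sorted(arr)
--     uL = 0
--     uR = len(arr) - 1
--     sL = 0
--     sR = len(arr) - 1
--
--     while True:
--         if arr[uL] != sortedArr[sL] and arr[uR] != sortedArr[sR]:
--             return uR - uL + 1
--         if arr[uL] == sortedArr[sL]:
--             uL += 1
--             sL += 1
--         if arr[uR] == sortedArr[sR]:
--             uR -= 1
--             sR -= 1
--         if uL == uR:
--             return 0
-- ===== SOURCE B (Python) =====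
-- def minimumWindowSort(arr):
--     n = len(arr)
--     j = -1
--     runmax = None
--     for k in range(n):
--         if runmax is not None and arr[k] < runmax:
--             j = k
--         if runmax is None or arr[k] > runmax:
--             runmax = arr[k]
--     if j == -1:
--         return 0
--     i = n
--     runmin = None
--     for k in range(n - 1, -1, -1):
--         if runmin is not None and arr[k] > runmin:
--             i = k
--         if runmin is None or arr[k] < runmin:
--             runmin = arr[k]
--     return j - i + 1
-- ===== Notes on version B (the rewrite author's own statement) =====
-- stated objective: alternative
-- what changed: B drops the sort entirely: two linear scans (running max left-to-right marks the last element smaller than some earlier one; running min right-to-left marks the first element larger than some later one) replace A's O(n log n) sort plus two-pointer comparison against the sorted copy.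
import Mathlib
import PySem

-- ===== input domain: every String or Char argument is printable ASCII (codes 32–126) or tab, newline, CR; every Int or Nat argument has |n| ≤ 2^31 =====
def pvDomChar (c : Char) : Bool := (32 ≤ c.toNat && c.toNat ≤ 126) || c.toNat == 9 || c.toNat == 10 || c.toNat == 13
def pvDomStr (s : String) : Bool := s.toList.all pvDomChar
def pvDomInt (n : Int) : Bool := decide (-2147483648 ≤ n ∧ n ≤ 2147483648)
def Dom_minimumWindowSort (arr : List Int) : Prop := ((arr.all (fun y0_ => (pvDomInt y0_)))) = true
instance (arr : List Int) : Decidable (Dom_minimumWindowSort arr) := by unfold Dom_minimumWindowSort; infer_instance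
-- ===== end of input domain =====

-- B replaces A's sort-and-two-pointer comparison with two linear min/max scans (no sort);
-- the equivalence below is about return values on inputs where A returns (Pre_), A raises elsewhere.

-- ===== PORT A =====
-- A's 'while True' loop; fuel bounds the iterations (2*len+2 always suffices on inputs where
-- the Python returns); any IndexError path (pyGet? = none) and fuel exhaustion yield junk 0,
-- both excluded by Pre_.
def minimumWindowSortLoop (arr sortedArr : List Int) : Nat → Int → Int → Int → Int → Int
  | 0, _, _, _, _ => 0
  | fuel + 1, uL, uR, sL, sR =>
    match PySem.List.pyGet? arr uL, PySem.List.pyGet? sortedArr sL,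
          PySem.List.pyGet? arr uR, PySem.List.pyGet? sortedArr sR with
    | some aL, some vL, some aR, some vR =>
      if aL ≠ vL ∧ aR ≠ vR then uR - uL + 1
      else
        let uL' := if aL = vL then uL + 1 else uL
        let sL' := if aL = vL then sL + 1 else sL
        let uR' := if aR = vR then uR - 1 else uR
        let sR' := if aR = vR then sR - 1 else sR
        if uL' = uR' then 0 else minimumWindowSortLoop arr sortedArr fuel uL' uR' sL' sR'
    | _, _, _, _ => 0

def minimumWindowSort (arr : List Int) : Int :=
  let sortedArr := PySem.List.sorted arr (fun x => x) false
  minimumWindowSortLoop arr sortedArr (2 * arr.length + 2)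
    0 (PySem.List.len arr - 1) 0 (PySem.List.len arr - 1)

-- ===== PORT B =====
-- Source B's first loop body: state (j, runmax)
def pvScanL (arr : List Int) (st : Int × Option Int) (k : Int) : Int × Option Int :=
  let v := PySem.List.pyGetD arr k 0
  ((match st.2 with | some m => if v < m then k else st.1 | none => st.1),
   (match st.2 with | some m => if v > m then some v else some m | none => some v))

-- Source B's second loop body: state (i, runmin)
def pvScanR (arr : List Int) (st : Int × Option Int) (k : Int) : Int × Option Int :=
  let v := PySem.List.pyGetD arr k 0
  ((match st.2 with | some m => if v > m then k else st.1 | none => st.1),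
   (match st.2 with | some m => if v < m then some v else some m | none => some v))

def minimumWindowSort_alt (arr : List Int) : Int :=
  let n := PySem.List.len arr
  let p := (PySem.List.pyRange 0 n 1).foldl (pvScanL arr) (-1, none)
  if p.1 = -1 then 0
  else
    let q := (PySem.List.pyRange (n - 1) (-1) (-1)).foldl (pvScanR arr) (n, none)
    p.1 - q.1 + 1

-- ===== PRECONDITION & SPEC =====
-- Pre_ excludes exactly the inputs on which the Python A raises IndexError (its pointers cross
-- without meeting): non-decreasing lists of even length or of length 1 (including []).
def Pre_minimumWindowSort (arr : List Int) : Prop :=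
  ¬ (arr.Pairwise (· ≤ ·) ∧ (arr.length % 2 = 0 ∨ arr.length = 1))
instance (arr : List Int) : Decidable (Pre_minimumWindowSort arr) := by
  unfold Pre_minimumWindowSort; infer_instance

def pvWitness_minimumWindowSort : List Int := [2, 1, 3]

def Spec_minimumWindowSort (arr : List Int) (out : Int) : Prop := out = minimumWindowSort_alt arr
instance (arr : List Int) (out : Int) : Decidable (Spec_minimumWindowSort arr out) := by
  unfold Spec_minimumWindowSort; infer_instance

-- ===== CLAIM (what is proved, stated in full; the proofs are below) =====
def Claim_equal_minimumWindowSort : Prop := ∀ (arr : List Int), Dom_minimumWindowSort arr → Pre_minimumWindowSort arr → Spec_minimumWindowSort arr (minimumWindowSort arr)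

-- ===== LEMMAS AND PROOFS =====

-- arr[k] for a Nat index, totalised (all uses are in range)
def pvG (arr : List Int) (k : Nat) : Int := arr.getD k 0

-- value of runmax after the first t steps of Source B's first loop
def pvR (arr : List Int) : Nat → Option Int
  | 0 => none
  | t + 1 => some (match pvR arr t with | none => pvG arr t | some m => max m (pvG arr t))

-- value of j after the first t steps of Source B's first loop
def pvJ (arr : List Int) : Nat → Int
  | 0 => -1
  | t + 1 => match pvR arr t with
      | some m => if pvG arr t < m then (t : Int) else pvJ arr t
      | none => pvJ arr t

-- value of runmin after the first s steps (indices n-1, n-2, …) of Source B's second loop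
def pvRm (arr : List Int) (n : Nat) : Nat → Option Int
  | 0 => none
  | s + 1 => some (match pvRm arr n s with | none => pvG arr (n - 1 - s) | some m => min m (pvG arr (n - 1 - s)))

-- value of i after the first s steps of Source B's second loop
def pvI (arr : List Int) (n : Nat) : Nat → Int
  | 0 => (n : Int)
  | s + 1 => match pvRm arr n s with
      | some m => if m < pvG arr (n - 1 - s) then ((n - 1 - s : Nat) : Int) else pvI arr n s
      | none => pvI arr n s

-- "some earlier element is bigger" / "some later element is smaller"
def pvBadL (arr : List Int) (k : Nat) : Prop := ∃ m < k, pvG arr k < pvG arr m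
def pvBadR (arr : List Int) (n k : Nat) : Prop := ∃ m, k < m ∧ m < n ∧ pvG arr m < pvG arr k

-- mismatch with the sorted copy
def pvMism (arr S : List Int) (k : Nat) : Prop := pvG arr k ≠ pvG S k

lemma scanL_foldl (arr : List Int) :
    ∀ t : Nat, (PySem.List.pyRange 0 (t : Int) 1).foldl (pvScanL arr) (-1, none) = (pvJ arr t, pvR arr t) := by
  intro t
  induction t with
  | zero => simp [PySem.List.pyRange_one_eq_nil, pvJ, pvR]
  | succ t ih =>
    have h0 : ((t + 1 : Nat) : Int) = (t : Int) + 1 := by push_cast; ring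
    rw [h0, PySem.List.pyRange_one_succ_right (by positivity), List.foldl_append, ih]
    simp only [List.foldl_cons, List.foldl_nil, pvScanL, pvJ, pvR, PySem.List.pyGetD_natCast]
    rcases h : pvR arr t with _ | m
    · simp [pvG]
    · simp only [pvG, Prod.mk.injEq]
      refine ⟨rfl, ?_⟩
      by_cases hlt : arr.getD t 0 > m
      · rw [if_pos hlt, max_eq_right (le_of_lt hlt)]
      · rw [if_neg hlt, max_eq_left (not_lt.mp hlt)]

lemma scanR_step (arr : List Int) (n s : Nat) :
    pvScanR arr (pvI arr n s, pvRm arr n s) (((n - 1 - s : Nat) : Int)) = (pvI arr n (s + 1), pvRm arr n (s + 1)) := by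
  simp only [pvScanR, pvI, pvRm, PySem.List.pyGetD_natCast, pvG]
  rcases h : pvRm arr n s with _ | m
  · simp
  · simp only [Prod.mk.injEq]
    refine ⟨rfl, ?_⟩
    by_cases hlt : arr.getD (n - 1 - s) 0 < m
    · rw [if_pos hlt, min_eq_right (le_of_lt hlt)]
    · rw [if_neg hlt, min_eq_left (not_lt.mp hlt)]

lemma scanR_aux (arr : List Int) (n : Nat) :
    ∀ s, s ≤ n → (PySem.List.pyRange 0 (n : Int) 1).foldr (fun x acc => pvScanR arr acc x) ((n : Int), none) =
      (PySem.List.pyRange 0 ((n - s : Nat) : Int) 1).foldr (fun x acc => pvScanR arr acc x) (pvI arr n s, pvRm arr n s) := by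
  intro s
  induction s with
  | zero => intro _; simp [pvI, pvRm]
  | succ s ih =>
    intro hs
    rw [ih (Nat.le_of_succ_le hs)]
    have h1 : n - s = (n - s - 1) + 1 := by omega
    have h2 : ((n - s : Nat) : Int) = ((n - s - 1 : Nat) : Int) + 1 := by omega
    rw [h2, PySem.List.pyRange_one_succ_right (by positivity), List.foldr_append]
    have h3 : n - 1 - s = n - s - 1 := by omega
    have h4 : n - (s + 1) = n - s - 1 := by omega
    rw [List.foldr_cons, List.foldr_nil, h4, ← h3, scanR_step]

lemma scanR_foldl (arr : List Int) (n : Nat) :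
    (PySem.List.pyRange ((n : Int) - 1) (-1) (-1)).foldl (pvScanR arr) ((n : Int), none) = (pvI arr n n, pvRm arr n n) := by
  have : PySem.List.pyRange ((n : Int) - 1) (-1) (-1) = (PySem.List.pyRange 0 (n : Int) 1).reverse := by
    rw [PySem.List.pyRange_neg_one_eq_reverse, show ((-1 : Int) + 1) = 0 by norm_num,
      show ((n : Int) - 1 + 1) = (n : Int) by ring]
  rw [this, List.foldl_reverse]
  have := scanR_aux arr n n le_rfl
  simpa using this

lemma pvR_none (arr : List Int) : ∀ t, pvR arr t = none ↔ t = 0 := by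
  intro t; cases t <;> simp [pvR]

lemma pvR_spec (arr : List Int) : ∀ t m, pvR arr t = some m →
    (∀ k < t, pvG arr k ≤ m) ∧ ∃ k < t, pvG arr k = m := by
  intro t
  induction t with
  | zero => intro m h; simp [pvR] at h
  | succ t ih =>
    intro m h
    simp only [pvR] at h
    rcases hR : pvR arr t with _ | m'
    · have ht : t = 0 := (pvR_none arr t).mp hR
      subst ht
      rw [hR] at h
      simp only [Option.some.injEq] at h
      subst h
      exact ⟨fun k hk => by interval_cases k; rfl, 0, Nat.zero_lt_one, rfl⟩
    · rw [hR] at h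
      simp only [Option.some.injEq] at h
      subst h
      obtain ⟨hub, k0, hk0, hv0⟩ := ih m' hR
      constructor
      · intro k hk
        rcases Nat.lt_succ_iff_lt_or_eq.mp hk with hk | hk
        · exact le_trans (hub k hk) (le_max_left _ _)
        · subst hk; exact le_max_right _ _
      · rcases max_choice m' (pvG arr t) with hmx | hmx
        · exact ⟨k0, Nat.lt_succ_of_lt hk0, by rw [hv0, hmx]⟩
        · exact ⟨t, Nat.lt_succ_self t, by rw [hmx]⟩

lemma pvJ_spec (arr : List Int) : ∀ t,
    (pvJ arr t = -1 ∧ ∀ k < t, ¬ pvBadL arr k) ∨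
    (∃ k < t, pvJ arr t = (k : Int) ∧ pvBadL arr k ∧ ∀ k' < t, pvBadL arr k' → k' ≤ k) := by
  intro t
  induction t with
  | zero => exact Or.inl ⟨rfl, by omega⟩
  | succ t ih =>
    rcases hR : pvR arr t with _ | m
    · have ht : t = 0 := (pvR_none arr t).mp hR
      subst ht
      refine Or.inl ⟨by simp [pvJ, hR], ?_⟩
      intro k hk
      interval_cases k
      rintro ⟨m, hm, _⟩; omega
    · obtain ⟨hub, k0, hk0, hv0⟩ := pvR_spec arr t m hR
      by_cases hc : pvG arr t < m
      · refine Or.inr ⟨t, Nat.lt_succ_self t, by simp [pvJ, hR, hc], ⟨k0, hk0, hv0 ▸ hc⟩, ?_⟩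
        intro k' hk' _; omega
      · have hnb : ¬ pvBadL arr t := by
          rintro ⟨m', hm', hlt⟩
          exact hc (lt_of_lt_of_le hlt (hub m' hm'))
        have hJ : pvJ arr (t + 1) = pvJ arr t := by simp [pvJ, hR, hc]
        rcases ih with ⟨h1, h2⟩ | ⟨k, hk, h1, h2, h3⟩
        · refine Or.inl ⟨hJ.trans h1, ?_⟩
          intro k hk
          rcases Nat.lt_succ_iff_lt_or_eq.mp hk with hk | hk
          · exact h2 k hk
          · subst hk; exact hnb
        · refine Or.inr ⟨k, Nat.lt_succ_of_lt hk, hJ.trans h1, h2, ?_⟩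
          intro k' hk' hb
          rcases Nat.lt_succ_iff_lt_or_eq.mp hk' with hk' | hk'
          · exact h3 k' hk' hb
          · subst hk'; exact absurd hb hnb

lemma pvRm_none (arr : List Int) (n : Nat) : ∀ s, pvRm arr n s = none ↔ s = 0 := by
  intro s; cases s <;> simp [pvRm]

lemma pvRm_spec (arr : List Int) (n : Nat) : ∀ s, s ≤ n → ∀ m, pvRm arr n s = some m →
    (∀ k, n - s ≤ k → k < n → m ≤ pvG arr k) ∧ ∃ k, n - s ≤ k ∧ k < n ∧ pvG arr k = m := by
  intro s
  induction s with
  | zero => intro _ m h; simp [pvRm] at h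
  | succ s ih =>
    intro hs m h
    simp only [pvRm] at h
    rcases hR : pvRm arr n s with _ | m'
    · have ht : s = 0 := (pvRm_none arr n s).mp hR
      subst ht
      rw [hR] at h
      simp only [Option.some.injEq] at h
      subst h
      refine ⟨fun k hk1 hk2 => ?_, n - 1, by omega, by omega, by norm_num⟩
      have : k = n - 1 := by omega
      subst this
      norm_num
    · rw [hR] at h
      simp only [Option.some.injEq] at h
      subst h
      obtain ⟨hub, k0, hk01, hk02, hv0⟩ := ih (by omega) m' hR
      constructor
      · intro k hk1 hk2
        by_cases hk : n - s ≤ k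
        · exact le_trans (min_le_left _ _) (hub k hk hk2)
        · have : k = n - 1 - s := by omega
          rw [this]; exact min_le_right _ _
      · rcases min_choice m' (pvG arr (n - 1 - s)) with hmx | hmx
        · exact ⟨k0, by omega, hk02, by rw [hv0, hmx]⟩
        · exact ⟨n - 1 - s, by omega, by omega, by rw [hmx]⟩

lemma pvI_spec (arr : List Int) (n : Nat) : ∀ s, s ≤ n →
    (pvI arr n s = (n : Int) ∧ ∀ k, n - s ≤ k → k < n → ¬ pvBadR arr n k) ∨
    (∃ k, n - s ≤ k ∧ k < n ∧ pvI arr n s = (k : Int) ∧ pvBadR arr n k ∧ ∀ k', n - s ≤ k' → k' < n → pvBadR arr n k' → k ≤ k') := by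
  intro s
  induction s with
  | zero => exact fun _ => Or.inl ⟨rfl, by omega⟩
  | succ s ih =>
    intro hs
    rcases hR : pvRm arr n s with _ | m
    · have ht : s = 0 := (pvRm_none arr n s).mp hR
      subst ht
      refine Or.inl ⟨by simp [pvI, hR], ?_⟩
      intro k hk1 hk2
      have : k = n - 1 := by omega
      subst this
      rintro ⟨m, hm1, hm2, _⟩; omega
    · obtain ⟨hub, k0, hk01, hk02, hv0⟩ := pvRm_spec arr n s (by omega) m hR
      by_cases hc : m < pvG arr (n - 1 - s)
      · refine Or.inr ⟨n - 1 - s, by omega, by omega, by simp [pvI, hR, hc], ⟨k0, by omega, hk02, hv0 ▸ hc⟩, ?_⟩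
        intro k' hk1' _ _; omega
      · have hnb : ¬ pvBadR arr n (n - 1 - s) := by
          rintro ⟨m', hm1', hm2', hlt⟩
          exact hc (lt_of_le_of_lt (hub m' (by omega) hm2') hlt)
        have hI : pvI arr n (s + 1) = pvI arr n s := by simp [pvI, hR, hc]
        rcases ih (by omega) with ⟨h1, h2⟩ | ⟨k, hk1, hk2, h1, h2, h3⟩
        · refine Or.inl ⟨hI.trans h1, ?_⟩
          intro k hka hkb
          by_cases hk : n - s ≤ k
          · exact h2 k hk hkb
          · have : k = n - 1 - s := by omega
            subst this; exact hnb
        · refine Or.inr ⟨k, by omega, hk2, hI.trans h1, h2, ?_⟩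
          intro k' hka hkb hb
          by_cases hk' : n - s ≤ k'
          · exact h3 k' hk' hkb hb
          · have : k' = n - 1 - s := by omega
            subst this; exact absurd hb hnb

-- ===== multiset lemmas relating mismatches with pvBadL/pvBadR =====

lemma pv_mem_take (l : List Int) (k t : Nat) (ht : t < k) (htl : t < l.length) : l.getD t 0 ∈ l.take k := by
  rw [List.mem_take_iff_getElem]
  exact ⟨t, by omega, by rw [List.getD_eq_getElem l 0 htl]⟩

lemma pv_take_exists (l : List Int) (k : Nat) (x : Int) (h : x ∈ l.take k) :
    ∃ t, t < k ∧ t < l.length ∧ l.getD t 0 = x := by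
  rw [List.mem_take_iff_getElem] at h
  obtain ⟨i, hi, he⟩ := h
  exact ⟨i, by omega, by omega, by rw [List.getD_eq_getElem l 0 (by omega), he]⟩

lemma pv_mem_drop (l : List Int) (k i : Nat) (hk : k ≤ i) (hi : i < l.length) : l.getD i 0 ∈ l.drop k := by
  rw [List.mem_drop_iff_getElem]
  refine ⟨i - k, by omega, ?_⟩
  rw [List.getD_eq_getElem l 0 hi]
  congr 1; omega

lemma pv_drop_exists (l : List Int) (k : Nat) (x : Int) (h : x ∈ l.drop k) :
    ∃ i, k ≤ i ∧ i < l.length ∧ l.getD i 0 = x := by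
  rw [List.mem_drop_iff_getElem] at h
  obtain ⟨i, hi, he⟩ := h
  exact ⟨k + i, by omega, by omega, by rw [List.getD_eq_getElem l 0 (by omega), he]⟩

lemma pv_sorted_le (S : List Int) (hp : S.Pairwise (· ≤ ·)) (t k : Nat) (htk : t ≤ k)
    (hk : k < S.length) : S.getD t 0 ≤ S.getD k 0 := by
  rcases Nat.lt_or_ge t k with h | h
  · rw [List.getD_eq_getElem S 0 (by omega), List.getD_eq_getElem S 0 hk]
    rw [List.pairwise_iff_getElem] at hp
    exact hp t k (by omega) hk h
  · have : t = k := by omega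
    rw [this]

lemma pv_cons_perm (a b : Int) (t : List Int) (h : (a :: t).Perm (b :: t)) : a = b := by
  have h2 : ([a] ++ t).Perm ([b] ++ t) := by simpa using h
  have := (List.perm_append_right_iff t).mp h2
  simpa [List.perm_singleton] using this

lemma pv_perm_take (arr S : List Int) (hlen : S.length = arr.length) (hperm : S.Perm arr)
    (k : Nat) (hk : k ≤ arr.length)
    (hsuf : ∀ t, k ≤ t → t < arr.length → arr.getD t 0 = S.getD t 0) :
    (S.take k).Perm (arr.take k) := by
  have hdrop : S.drop k = arr.drop k := by
    apply List.ext_getElem (by simp [hlen])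
    intro i h1 h2
    rw [List.getElem_drop, List.getElem_drop]
    have h3 : k + i < arr.length := by simp at h2; omega
    rw [← List.getD_eq_getElem S 0 (by omega), ← List.getD_eq_getElem arr 0 h3]
    exact (hsuf (k + i) (by omega) h3).symm
  have h := hperm
  rw [← List.take_append_drop k S, ← List.take_append_drop k arr, hdrop] at h
  exact (List.perm_append_right_iff _).mp h

lemma pv_perm_drop (arr S : List Int) (hlen : S.length = arr.length) (hperm : S.Perm arr)
    (k : Nat) (hpre : ∀ t, t < k → arr.getD t 0 = S.getD t 0) :
    (S.drop k).Perm (arr.drop k) := by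
  have htake : S.take k = arr.take k := by
    apply List.ext_getElem (by simp [hlen])
    intro i h1 h2
    rw [List.getElem_take, List.getElem_take]
    have h3 : i < arr.length := by simp at h2; omega
    have h4 : i < k := by simp at h2; omega
    rw [← List.getD_eq_getElem S 0 (by omega), ← List.getD_eq_getElem arr 0 h3]
    exact (hpre i h4).symm
  have h := hperm
  rw [← List.take_append_drop k S, ← List.take_append_drop k arr, htake] at h
  exact (List.perm_append_left_iff _).mp h

lemma pv_sorted_facts (arr S : List Int) (hS : S = PySem.List.sorted arr (fun x => x) false) :
    S.length = arr.length ∧ S.Perm arr ∧ S.Pairwise (· ≤ ·) := by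
  subst hS
  exact ⟨PySem.List.length_sorted arr _ _, PySem.List.sorted_perm arr _ _,
    PySem.List.sorted_pairwise arr (fun x => x)⟩

lemma badL_le_lastMism (arr S : List Int) (hS : S = PySem.List.sorted arr (fun x => x) false)
    (k : Nat) (hk : k < arr.length) (hb : pvBadL arr k) :
    ∃ t, k ≤ t ∧ t < arr.length ∧ pvMism arr S t := by
  obtain ⟨hlen, hperm, hpair⟩ := pv_sorted_facts arr S hS
  by_contra hno
  push_neg at hno
  have hsuf : ∀ t, k ≤ t → t < arr.length → arr.getD t 0 = S.getD t 0 := by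
    intro t h1 h2
    have := hno t h1 h2
    simpa [pvMism, pvG, not_not] using this
  obtain ⟨m, hm, hlt⟩ := hb
  simp only [pvG] at hlt
  have hpt := pv_perm_take arr S hlen hperm k (le_of_lt hk) hsuf
  have hmem : arr.getD m 0 ∈ S.take k := hpt.mem_iff.mpr (pv_mem_take arr k m hm (by omega))
  obtain ⟨t, htk, _, hte⟩ := pv_take_exists S k _ hmem
  have hle : S.getD t 0 ≤ S.getD k 0 := pv_sorted_le S hpair t k (le_of_lt htk) (by omega)
  have heq := hsuf k le_rfl hk
  omega

lemma lastMism_badL (arr S : List Int) (hS : S = PySem.List.sorted arr (fun x => x) false)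
    (j : Nat) (hj : j < arr.length) (hm : pvMism arr S j)
    (hmax : ∀ t, j < t → t < arr.length → ¬ pvMism arr S t) :
    pvBadL arr j := by
  obtain ⟨hlen, hperm, hpair⟩ := pv_sorted_facts arr S hS
  have hsuf : ∀ t, j + 1 ≤ t → t < arr.length → arr.getD t 0 = S.getD t 0 := by
    intro t h1 h2
    have := hmax t (by omega) h2
    simpa [pvMism, pvG, not_not] using this
  have hpt := pv_perm_take arr S hlen hperm (j + 1) (by omega) hsuf
  have h1 : arr.getD j 0 ∈ S.take (j + 1) := hpt.mem_iff.mpr (pv_mem_take arr (j + 1) j (by omega) hj)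
  obtain ⟨t, htj, _, hte⟩ := pv_take_exists S (j + 1) _ h1
  have hle1 : S.getD t 0 ≤ S.getD j 0 := pv_sorted_le S hpair t j (by omega) (by omega)
  have hne : arr.getD j 0 ≠ S.getD j 0 := by simpa [pvMism, pvG] using hm
  have hlt : arr.getD j 0 < S.getD j 0 := by omega
  have h2 : S.getD j 0 ∈ arr.take (j + 1) := hpt.mem_iff.mp (pv_mem_take S (j + 1) j (by omega) (by omega))
  obtain ⟨m, hmj, _, hme⟩ := pv_take_exists arr (j + 1) _ h2
  have hmne : m ≠ j := by
    intro he
    rw [he] at hme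
    omega
  exact ⟨m, by omega, by simp only [pvG]; omega⟩

lemma badR_ge_firstMism (arr S : List Int) (hS : S = PySem.List.sorted arr (fun x => x) false)
    (k : Nat) (hk : k < arr.length) (hb : pvBadR arr arr.length k) :
    ∃ t, t ≤ k ∧ pvMism arr S t := by
  obtain ⟨hlen, hperm, hpair⟩ := pv_sorted_facts arr S hS
  by_contra hno
  push_neg at hno
  have hpre : ∀ t, t < k + 1 → arr.getD t 0 = S.getD t 0 := by
    intro t h1
    have := hno t (by omega)
    simpa [pvMism, pvG, not_not] using this
  obtain ⟨m, hkm, hmn, hlt⟩ := hb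
  simp only [pvG] at hlt
  have hpd := pv_perm_drop arr S hlen hperm (k + 1) hpre
  have hmem : arr.getD m 0 ∈ S.drop (k + 1) := hpd.mem_iff.mpr (pv_mem_drop arr (k + 1) m (by omega) hmn)
  obtain ⟨t, htk, htn, hte⟩ := pv_drop_exists S (k + 1) _ hmem
  have hge : S.getD k 0 ≤ S.getD t 0 := pv_sorted_le S hpair k t (by omega) htn
  have heq := hpre k (by omega)
  omega

lemma firstMism_badR (arr S : List Int) (hS : S = PySem.List.sorted arr (fun x => x) false)
    (i : Nat) (hi : i < arr.length) (hm : pvMism arr S i)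
    (hmin : ∀ t, t < i → ¬ pvMism arr S t) :
    pvBadR arr arr.length i := by
  obtain ⟨hlen, hperm, hpair⟩ := pv_sorted_facts arr S hS
  have hpre : ∀ t, t < i → arr.getD t 0 = S.getD t 0 := by
    intro t h1
    have := hmin t h1
    simpa [pvMism, pvG, not_not] using this
  have hpd := pv_perm_drop arr S hlen hperm i hpre
  have h1 : arr.getD i 0 ∈ S.drop i := hpd.mem_iff.mpr (pv_mem_drop arr i i le_rfl hi)
  obtain ⟨t, hti, htn, hte⟩ := pv_drop_exists S i _ h1
  have hle : S.getD i 0 ≤ S.getD t 0 := pv_sorted_le S hpair i t hti htn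
  have hne : arr.getD i 0 ≠ S.getD i 0 := by simpa [pvMism, pvG] using hm
  have hgt : S.getD i 0 < arr.getD i 0 := by omega
  have h2 : S.getD i 0 ∈ arr.drop i := hpd.mem_iff.mp (pv_mem_drop S i i le_rfl (by omega))
  obtain ⟨m, him, hmn2, hme⟩ := pv_drop_exists arr i _ h2
  have hmne : m ≠ i := by
    intro he
    rw [he] at hme
    omega
  exact ⟨m, by omega, hmn2, by simp only [pvG]; omega⟩

lemma mism_ne (arr S : List Int) (hS : S = PySem.List.sorted arr (fun x => x) false)
    (i j : Nat) (hi : i < arr.length) (hj : j < arr.length)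
    (hmi : pvMism arr S i) (hmj : pvMism arr S j)
    (hmin : ∀ t, t < i → ¬ pvMism arr S t) (hmax : ∀ t, j < t → t < arr.length → ¬ pvMism arr S t) :
    i < j := by
  obtain ⟨hlen, hperm, hpair⟩ := pv_sorted_facts arr S hS
  have hij : i ≤ j := by
    by_contra h
    push_neg at h
    exact hmin j h hmj
  rcases Nat.lt_or_ge i j with h | h
  · exact h
  exfalso
  have hej : i = j := by omega
  subst hej
  have hpre : ∀ t, t < i → arr.getD t 0 = S.getD t 0 := by
    intro t h1
    have := hmin t h1
    simpa [pvMism, pvG, not_not] using this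
  have hpd := pv_perm_drop arr S hlen hperm i hpre
  have hdrop1 : S.drop (i + 1) = arr.drop (i + 1) := by
    apply List.ext_getElem (by simp [hlen])
    intro t h1 h2
    rw [List.getElem_drop, List.getElem_drop]
    have h3 : i + 1 + t < arr.length := by simp at h2; omega
    rw [← List.getD_eq_getElem S 0 (by omega), ← List.getD_eq_getElem arr 0 h3]
    have := hmax (i + 1 + t) (by omega) h3
    simp only [pvMism, pvG, not_not] at this
    exact this.symm
  rw [← List.getElem_cons_drop (as := S) (by omega), ← List.getElem_cons_drop (as := arr) hi, hdrop1] at hpd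
  have heq : S[i]'(by omega) = arr[i]'hi := pv_cons_perm _ _ _ hpd
  apply hmi
  simp only [pvMism, pvG, not_not]
  rw [List.getD_eq_getElem arr 0 hi, List.getD_eq_getElem S 0 (by omega), heq]

lemma pv_mism_lt (arr S : List Int) (hlen : S.length = arr.length) (t : Nat)
    (h : pvMism arr S t) : t < arr.length := by
  by_contra hge
  push_neg at hge
  apply h
  simp only [pvMism, pvG, not_not]
  rw [List.getD_eq_default arr 0 hge, List.getD_eq_default S 0 (by omega)]

lemma noMism_iff_pairwise (arr S : List Int) (hS : S = PySem.List.sorted arr (fun x => x) false) :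
    (∀ t, ¬ pvMism arr S t) ↔ arr.Pairwise (· ≤ ·) := by
  obtain ⟨hlen, hperm, hpair⟩ := pv_sorted_facts arr S hS
  constructor
  · intro h
    have harr : arr = S := by
      apply List.ext_getElem hlen.symm
      intro i h1 h2
      have := h i
      simp only [pvMism, pvG, not_not] at this
      rw [← List.getD_eq_getElem arr 0 h1, ← List.getD_eq_getElem S 0 h2]
      exact this
    rw [harr]
    exact hpair
  · intro hp t
    have hsa : S = arr := by
      rw [hS]
      exact PySem.List.sorted_eq_self_of_pairwise arr (fun x => x) hp
    simp [pvMism, pvG, hsa]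

-- ===== A's loop =====

lemma loopA_mism (arr S : List Int) (hlen : S.length = arr.length)
    (i j : Nat) (hij : i < j) (hj : j < arr.length)
    (hmi : pvMism arr S i) (hmj : pvMism arr S j)
    (hmin : ∀ t, t < i → ¬ pvMism arr S t) (hmax : ∀ t, j < t → t < arr.length → ¬ pvMism arr S t) :
    ∀ fuel k m : Nat, k ≤ i → j ≤ m → m < arr.length → (i - k) + (m - j) < fuel →
      minimumWindowSortLoop arr S fuel (k : Int) (m : Int) (k : Int) (m : Int) = (j : Int) - (i : Int) + 1 := by
  simp only [pvMism, pvG] at hmi hmj hmin hmax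
  intro fuel
  induction fuel with
  | zero => intro k m _ _ _ h; omega
  | succ fuel ih =>
    intro k m hki hjm hmn hfuel
    have hkn : k < arr.length := by omega
    have e1 : PySem.List.pyGet? arr (k : Int) = some (arr.getD k 0) := by
      rw [PySem.List.pyGet?_natCast, List.getD_eq_getElem arr 0 hkn, List.getElem?_eq_getElem hkn]
    have e2 : PySem.List.pyGet? S (k : Int) = some (S.getD k 0) := by
      rw [PySem.List.pyGet?_natCast, List.getD_eq_getElem S 0 (by omega), List.getElem?_eq_getElem (by omega)]
    have e3 : PySem.List.pyGet? arr (m : Int) = some (arr.getD m 0) := by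
      rw [PySem.List.pyGet?_natCast, List.getD_eq_getElem arr 0 hmn, List.getElem?_eq_getElem hmn]
    have e4 : PySem.List.pyGet? S (m : Int) = some (S.getD m 0) := by
      rw [PySem.List.pyGet?_natCast, List.getD_eq_getElem S 0 (by omega), List.getElem?_eq_getElem (by omega)]
    rw [minimumWindowSortLoop, e1, e2, e3, e4]
    by_cases hck : arr.getD k 0 = S.getD k 0 <;> by_cases hcm : arr.getD m 0 = S.getD m 0
    · -- neither end mismatches: both pointers move
      have hklt : k < i := by
        by_contra h
        have hk2 : k = i := by omega
        subst hk2
        exact hmi hck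
      have hmgt : j < m := by
        by_contra h
        have hm2 : m = j := by omega
        subst hm2
        exact hmj hcm
      simp only [if_neg (by tauto : ¬(arr.getD k 0 ≠ S.getD k 0 ∧ arr.getD m 0 ≠ S.getD m 0)),
        if_pos hck, if_pos hcm]
      rw [if_neg (by omega : ¬((k : Int) + 1 = (m : Int) - 1))]
      have c1 : (k : Int) + 1 = ((k + 1 : Nat) : Int) := by push_cast; ring
      have c2 : (m : Int) - 1 = ((m - 1 : Nat) : Int) := by omega
      rw [c1, c2]
      exact ih (k + 1) (m - 1) (by omega) (by omega) (by omega) (by omega)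
    · -- only left end matches: left pointer moves
      have hklt : k < i := by
        by_contra h
        have hk2 : k = i := by omega
        subst hk2
        exact hmi hck
      have hmj' : m = j := by
        by_contra h
        exact (hmax m (by omega) hmn) hcm
      simp only [if_neg (by tauto : ¬(arr.getD k 0 ≠ S.getD k 0 ∧ arr.getD m 0 ≠ S.getD m 0)),
        if_pos hck, if_neg hcm]
      rw [if_neg (by omega : ¬((k : Int) + 1 = (m : Int)))]
      have c1 : (k : Int) + 1 = ((k + 1 : Nat) : Int) := by push_cast; ring
      rw [c1]
      exact ih (k + 1) m (by omega) (by omega) (by omega) (by omega)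
    · -- only right end matches: right pointer moves
      have hki' : k = i := by
        by_contra h
        exact (hmin k (by omega)) hck
      have hmgt : j < m := by
        by_contra h
        have hm2 : m = j := by omega
        subst hm2
        exact hmj hcm
      simp only [if_neg (by tauto : ¬(arr.getD k 0 ≠ S.getD k 0 ∧ arr.getD m 0 ≠ S.getD m 0)),
        if_neg hck, if_pos hcm]
      rw [if_neg (by omega : ¬((k : Int) = (m : Int) - 1))]
      have c2 : (m : Int) - 1 = ((m - 1 : Nat) : Int) := by omega
      rw [c2]
      exact ih k (m - 1) (by omega) (by omega) (by omega) (by omega)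
    · -- both ends mismatch: return
      have hki' : k = i := by
        by_contra h
        exact (hmin k (by omega)) hck
      have hmj' : m = j := by
        by_contra h
        exact (hmax m (by omega) hmn) hcm
      simp only [ne_eq]
      rw [if_pos (⟨hck, hcm⟩ : ¬arr.getD k 0 = S.getD k 0 ∧ ¬arr.getD m 0 = S.getD m 0)]
      omega

lemma loopA_sorted (arr : List Int) (hodd : arr.length % 2 = 1) (h3 : 3 ≤ arr.length) :
    ∀ fuel k : Nat, 2 * k + 3 ≤ arr.length → arr.length ≤ fuel + 2 * k →
      minimumWindowSortLoop arr arr fuel (k : Int) ((arr.length - 1 - k : Nat) : Int) (k : Int) ((arr.length - 1 - k : Nat) : Int) = 0 := by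
  intro fuel
  induction fuel with
  | zero => intro k h1 h2; omega
  | succ fuel ih =>
    intro k h1 h2
    have hkn : k < arr.length := by omega
    have hmn : arr.length - 1 - k < arr.length := by omega
    have e1 : PySem.List.pyGet? arr (k : Int) = some (arr.getD k 0) := by
      rw [PySem.List.pyGet?_natCast, List.getD_eq_getElem arr 0 hkn, List.getElem?_eq_getElem hkn]
    have e3 : PySem.List.pyGet? arr ((arr.length - 1 - k : Nat) : Int) = some (arr.getD (arr.length - 1 - k) 0) := by
      rw [PySem.List.pyGet?_natCast, List.getD_eq_getElem arr 0 hmn, List.getElem?_eq_getElem hmn]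
    rw [minimumWindowSortLoop, e1, e3]
    simp only [if_neg (by simp : ¬(arr.getD k 0 ≠ arr.getD k 0 ∧ arr.getD (arr.length - 1 - k) 0 ≠ arr.getD (arr.length - 1 - k) 0)),
      if_pos rfl, if_true]
    by_cases hmeet : (k : Int) + 1 = ((arr.length - 1 - k : Nat) : Int) - 1
    · rw [if_pos hmeet]
    · rw [if_neg hmeet]
      have c1 : (k : Int) + 1 = ((k + 1 : Nat) : Int) := by push_cast; ring
      have c2 : ((arr.length - 1 - k : Nat) : Int) - 1 = ((arr.length - 1 - (k + 1) : Nat) : Int) := by omega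
      rw [c1, c2]
      exact ih (k + 1) (by omega) (by omega)

-- ===== VERDICT (by name: the statement is the Claim_ definition above) =====
theorem minimumWindowSort_spec : Claim_equal_minimumWindowSort := by
  unfold Claim_equal_minimumWindowSort
  intro arr _ hpre
  unfold Pre_minimumWindowSort at hpre
  unfold Spec_minimumWindowSort
  set S := PySem.List.sorted arr (fun x => x) false with hSdef
  obtain ⟨hlen, hperm, hpair⟩ := pv_sorted_facts arr S hSdef
  haveI hdec : DecidablePred (pvMism arr S) := fun t => by unfold pvMism; infer_instance
  by_cases hex : ∃ t, pvMism arr S t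
  · -- arr is not sorted: both sides compute last mismatch - first mismatch + 1
    have hex' := hex
    obtain ⟨t0, ht0⟩ := hex'
    have ht0n : t0 < arr.length := pv_mism_lt arr S hlen t0 ht0
    have hmi : pvMism arr S (Nat.find hex) := Nat.find_spec hex
    have hmin : ∀ t, t < Nat.find hex → ¬ pvMism arr S t := fun t ht => Nat.find_min hex ht
    have hmj : pvMism arr S (Nat.findGreatest (pvMism arr S) (arr.length - 1)) :=
      Nat.findGreatest_spec (by omega : t0 ≤ arr.length - 1) ht0
    have hjle : Nat.findGreatest (pvMism arr S) (arr.length - 1) ≤ arr.length - 1 :=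
      Nat.findGreatest_le _
    have hj : Nat.findGreatest (pvMism arr S) (arr.length - 1) < arr.length := by omega
    have hmax : ∀ t, Nat.findGreatest (pvMism arr S) (arr.length - 1) < t → t < arr.length → ¬ pvMism arr S t :=
      fun t h1 h2 => Nat.findGreatest_is_greatest h1 (by omega)
    have hi : Nat.find hex < arr.length := pv_mism_lt arr S hlen _ hmi
    have hij : Nat.find hex < Nat.findGreatest (pvMism arr S) (arr.length - 1) :=
      mism_ne arr S hSdef _ _ hi hj hmi hmj hmin hmax
    have hA : minimumWindowSort arr =
        ((Nat.findGreatest (pvMism arr S) (arr.length - 1) : Nat) : Int) - ((Nat.find hex : Nat) : Int) + 1 := by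
      have c1 : (arr.length : Int) - 1 = ((arr.length - 1 : Nat) : Int) := by omega
      simp only [minimumWindowSort, PySem.List.len_eq, ← hSdef, c1]
      have := loopA_mism arr S hlen _ _ hij hj hmi hmj hmin hmax (2 * arr.length + 2) 0
        (arr.length - 1) (by omega) (by omega) (by omega) (by omega)
      simpa using this
    have hJ : pvJ arr arr.length = ((Nat.findGreatest (pvMism arr S) (arr.length - 1) : Nat) : Int) := by
      have hbj : pvBadL arr (Nat.findGreatest (pvMism arr S) (arr.length - 1)) :=
        lastMism_badL arr S hSdef _ hj hmj hmax
      rcases pvJ_spec arr arr.length with ⟨h1, h2⟩ | ⟨k, hk, h1, h2, h3⟩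
      · exact absurd hbj (h2 _ hj)
      · have hkj : Nat.findGreatest (pvMism arr S) (arr.length - 1) ≤ k := h3 _ hj hbj
        have hjk : k ≤ Nat.findGreatest (pvMism arr S) (arr.length - 1) := by
          obtain ⟨t, htk, htn, htm⟩ := badL_le_lastMism arr S hSdef k hk h2
          have : t ≤ Nat.findGreatest (pvMism arr S) (arr.length - 1) := by
            by_contra hcon
            exact hmax t (by omega) htn htm
          omega
        rw [h1, le_antisymm hjk hkj]
    have hI : pvI arr arr.length arr.length = ((Nat.find hex : Nat) : Int) := by
      have hbi : pvBadR arr arr.length (Nat.find hex) :=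
        firstMism_badR arr S hSdef _ hi hmi hmin
      rcases pvI_spec arr arr.length arr.length le_rfl with ⟨h1, h2⟩ | ⟨k, hk0, hkn, h1, h2, h3⟩
      · exact absurd hbi (h2 _ (by omega) hi)
      · have hki : k ≤ Nat.find hex := h3 _ (by omega) hi hbi
        have hik : Nat.find hex ≤ k := by
          obtain ⟨t, htk, htm⟩ := badR_ge_firstMism arr S hSdef k hkn h2
          have : Nat.find hex ≤ t := le_of_not_gt fun hgt => hmin t hgt htm
          omega
        rw [h1, le_antisymm hki hik]
    have hne : ¬ ((Nat.findGreatest (pvMism arr S) (arr.length - 1) : Nat) : Int) = -1 := by omega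
    simp only [minimumWindowSort_alt, PySem.List.len_eq]
    rw [scanL_foldl arr arr.length, scanR_foldl arr arr.length]
    simp only [hJ, hI, if_neg hne]
    rw [hA]
  · -- arr is sorted (of odd length ≥ 3 under Pre_): both sides return 0
    have hnom : ∀ t, ¬ pvMism arr S t := fun t ht => hex ⟨t, ht⟩
    have hpw : arr.Pairwise (· ≤ ·) := (noMism_iff_pairwise arr S hSdef).mp hnom
    have hSa : S = arr := by
      rw [hSdef]
      exact PySem.List.sorted_eq_self_of_pairwise arr (fun x => x) hpw
    have hcond : ¬ (arr.length % 2 = 0 ∨ arr.length = 1) := fun h => hpre ⟨hpw, h⟩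
    have hodd : arr.length % 2 = 1 := by omega
    have h3 : 3 ≤ arr.length := by omega
    have hA : minimumWindowSort arr = 0 := by
      have c1 : (arr.length : Int) - 1 = ((arr.length - 1 - 0 : Nat) : Int) := by omega
      simp only [minimumWindowSort, PySem.List.len_eq, ← hSdef, hSa, c1]
      have := loopA_sorted arr hodd h3 (2 * arr.length + 2) 0 (by omega) (by omega)
      simpa using this
    have hJ : pvJ arr arr.length = -1 := by
      rcases pvJ_spec arr arr.length with ⟨h1, _⟩ | ⟨k, hk, h1, h2, _⟩
      · exact h1
      · exfalso
        obtain ⟨m, hm, hlt⟩ := h2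
        have := pv_sorted_le arr hpw m k (le_of_lt hm) hk
        simp only [pvG] at hlt
        omega
    simp only [minimumWindowSort_alt, PySem.List.len_eq]
    rw [scanL_foldl arr arr.length]
    simp only [hJ, if_true, eq_self_iff_true]
    rw [hA]
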